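-- pv_equiv track=rewrite | github.com/thicoxiang/The-persistence-and-maximum-cardinality-matching-of-single-to-multiple-bipartite-graphs | project2.py | judgment_bipartite_graphs
-- ===== SOURCE A (Python) =====
-- def judgment_bipartite_graphs(e_0p, e_wp, e_1p):
--     e_1 = set()
--     for edge in e_1p:
--         modified_edge = tuple(
--             (node[:-2] if node.startswith('y')
--              else node) for node in edge)
--         e_1.add(modified_edge)
--
--     e_0 = set()
--     for edge in e_0p:
--         modified_edge = tuple(
--             (node[:-2] if node.startswith('y')
--              else node) for node in edge)
--         e_0.add(modified_edge)
--
--     e_w = set()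
--     edge_count = {}
--     for edge in e_wp:
--         modified_edge = (edge[0], edge[1][:-2])
--         if modified_edge in edge_count:
--             edge_count[modified_edge] += 1
--         else:
--             edge_count[modified_edge] = 1
--
--     E1 = set()
--     Ew = set()
--
--     for edge, count in edge_count.items():
--         if count > 1:
--             E1.add(edge)
--         else:
--             Ew.add(edge)
--
--     En = set()
--     common_x = set()
--     for edge in E1:
--         x = edge[0]
--         same_x_edges = set(
--             e for e in E1 if e[0] == x)
--         if len(same_x_edges) > 1:
--             En |= same_x_edges
--
--     E1 -= En
--
--     common_x = set()
--     for edge in Ew: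
--         common_x.add(edge[0])
--
--     for edge in E1:
--         if edge[0] in common_x:
--             En.add(edge)
--
--     E1 -= En
--     Ew -= En
--
--     merged_set = Ew | En
--
--     E_1 = e_1 | E1
--     E_w = merged_set
--     E_0 = e_0
--     return E_0, E_w, E_1
-- ===== SOURCE B (Python) =====
-- def judgment_bipartite_graphs(e_0p, e_wp, e_1p):
--     def strip(node):
--         return node[:-2] if node.startswith('y') else node
--
--     e_0 = {(strip(a), strip(b)) for a, b in e_0p}
--     e_1 = {(strip(a), strip(b)) for a, b in e_1p}
--
--     count = {}
--     for a, b in e_wp: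
--         m = (a, b[:-2])
--         count[m] = count.get(m, 0) + 1
--     uniq = [m for m, c in count.items() if c == 1]
--     dup = [m for m, c in count.items() if c > 1]
--
--     groups = {}
--     for m in dup:
--         groups[m[0]] = groups.get(m[0], []) + [m]
--     xs_uniq = {m[0] for m in uniq}
--
--     keep = [m for m in dup
--             if len(groups[m[0]]) == 1 and m[0] not in xs_uniq]
--     moved = [m for g in groups.values() if len(g) > 1 for m in g] + \
--             [m for m in dup
--              if len(groups[m[0]]) == 1 and m[0] in xs_uniq]
--
--     return e_0, set(uniq + moved), e_1 | set(keep)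
-- ===== Notes on version B (the rewrite author's own statement) =====
-- stated objective: alternative
-- what changed: B replaces A's duplicate-edge classification (for every duplicated edge, rescan the whole duplicated-edge set to collect same-x edges, then repeated set differences) by one grouping dict keyed on the first coordinate built in a single pass, after which the kept/merged edges are read off with flat comprehensions and no set differences; this removes the O(d^2) inner rescans (d = duplicated edges), though on the generated inputs d is too small for a measured speed-up.
import Mathlib
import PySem

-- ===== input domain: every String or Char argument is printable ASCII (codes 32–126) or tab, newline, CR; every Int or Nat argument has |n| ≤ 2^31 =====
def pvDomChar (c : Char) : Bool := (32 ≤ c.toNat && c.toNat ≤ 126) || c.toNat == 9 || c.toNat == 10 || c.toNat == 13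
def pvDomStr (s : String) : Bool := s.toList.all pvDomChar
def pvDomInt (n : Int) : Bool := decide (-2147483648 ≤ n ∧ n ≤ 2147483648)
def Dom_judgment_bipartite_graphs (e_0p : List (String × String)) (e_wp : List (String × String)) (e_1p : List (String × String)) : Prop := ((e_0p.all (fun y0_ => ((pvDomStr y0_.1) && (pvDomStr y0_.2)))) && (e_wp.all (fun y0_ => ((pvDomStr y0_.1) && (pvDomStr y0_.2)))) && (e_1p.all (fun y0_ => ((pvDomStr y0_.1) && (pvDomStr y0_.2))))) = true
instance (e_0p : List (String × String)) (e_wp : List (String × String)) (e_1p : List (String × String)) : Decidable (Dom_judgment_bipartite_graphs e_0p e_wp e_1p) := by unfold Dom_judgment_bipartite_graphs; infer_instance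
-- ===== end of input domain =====

-- B replaces A's duplicate-edge classification (inner rescans over the duplicated-edge set
-- plus repeated set differences) by a single grouping dict on the first coordinate; same value.

-- ===== PORT A =====
-- A-side helper: `node[:-2] if node.startswith('y') else node` (inlined in A's generator exprs)
def pvNodeA (node : String) : String :=
  if PySem.Str.startswith node "y" then PySem.Str.slice node none (some (-2)) else node

def judgment_bipartite_graphs (e_0p : List (String × String)) (e_wp : List (String × String)) (e_1p : List (String × String)) : (List (String × String)) × (List (String × String)) × (List (String × String)) :=
  let e_1 : PySem.Set (String × String) :=
    e_1p.foldl (fun s edge => PySem.Set.add s (pvNodeA edge.1, pvNodeA edge.2)) PySem.Set.empty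
  let e_0 : PySem.Set (String × String) :=
    e_0p.foldl (fun s edge => PySem.Set.add s (pvNodeA edge.1, pvNodeA edge.2)) PySem.Set.empty
  -- `e_w = set()` in the source is created and never used; nothing to port
  let edge_count : PySem.Dict (String × String) Int :=
    e_wp.foldl (fun d edge =>
      let m := (edge.1, PySem.Str.slice edge.2 none (some (-2)))
      -- `edge_count[m] += 1` reads the present key: getD is exact here
      if d.contains m then d.insert m (d.getD m 0 + 1) else d.insert m 1) PySem.Dict.empty
  let p := edge_count.items.foldl
    (fun (q : PySem.Set (String × String) × PySem.Set (String × String)) ec =>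
      if ec.2 > 1 then (PySem.Set.add q.1 ec.1, q.2) else (q.1, PySem.Set.add q.2 ec.1))
    (PySem.Set.empty, PySem.Set.empty)
  let E1 := p.1
  let Ew := p.2
  let En : PySem.Set (String × String) :=
    E1.foldl (fun S edge =>
      let same_x_edges := PySem.Set.ofList (E1.filter (fun e => e.1 == edge.1))
      if PySem.Set.len same_x_edges > 1 then PySem.Set.union S same_x_edges else S)
      PySem.Set.empty
  let E1' := PySem.Set.diff E1 En
  let common_x : PySem.Set String := Ew.foldl (fun s edge => PySem.Set.add s edge.1) PySem.Set.empty
  let En' := E1'.foldl (fun S edge => if PySem.Set.contains common_x edge.1 then PySem.Set.add S edge else S) En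
  let E1'' := PySem.Set.diff E1' En'
  let Ew' := PySem.Set.diff Ew En'
  let merged_set := PySem.Set.union Ew' En'
  (e_0, merged_set, PySem.Set.union e_1 E1'')

-- ===== PORT B =====
-- B-side helper: B's local `strip`
def pvStripB (node : String) : String :=
  if PySem.Str.startswith node "y" then PySem.Str.slice node none (some (-2)) else node

def judgment_bipartite_graphs_alt (e_0p : List (String × String)) (e_wp : List (String × String)) (e_1p : List (String × String)) : (List (String × String)) × (List (String × String)) × (List (String × String)) :=
  let e_0 : PySem.Set (String × String) :=
    PySem.Set.ofList (e_0p.map (fun p => (pvStripB p.1, pvStripB p.2)))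
  let e_1 : PySem.Set (String × String) :=
    PySem.Set.ofList (e_1p.map (fun p => (pvStripB p.1, pvStripB p.2)))
  let count : PySem.Dict (String × String) Int :=
    e_wp.foldl (fun d p =>
      let m := (p.1, PySem.Str.slice p.2 none (some (-2)))
      d.insert m (d.getD m 0 + 1)) PySem.Dict.empty
  let uniq := (count.items.filter (fun mc => mc.2 == 1)).map (·.1)
  let dup := (count.items.filter (fun mc => 1 < mc.2)).map (·.1)
  let groups : PySem.Dict String (List (String × String)) :=
    dup.foldl (fun d m => d.insert m.1 (d.getD m.1 [] ++ [m])) PySem.Dict.empty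
  let xs_uniq : PySem.Set String := PySem.Set.ofList (uniq.map (·.1))
  let keep := dup.filter (fun m =>
    (groups.getD m.1 []).length == 1 && !(PySem.Set.contains xs_uniq m.1))
  let moved := (groups.values.filter (fun g => 1 < g.length)).flatMap id
      ++ dup.filter (fun m =>
        (groups.getD m.1 []).length == 1 && PySem.Set.contains xs_uniq m.1)
  (e_0, PySem.Set.ofList (uniq ++ moved), PySem.Set.union e_1 (PySem.Set.ofList keep))

-- ===== PRECONDITION & SPEC =====
def Spec_judgment_bipartite_graphs (e_0p : List (String × String)) (e_wp : List (String × String)) (e_1p : List (String × String)) (out : (List (String × String)) × (List (String × String)) × (List (String × String))) : Prop := out = judgment_bipartite_graphs_alt e_0p e_wp e_1p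
instance (e_0p : List (String × String)) (e_wp : List (String × String)) (e_1p : List (String × String)) (out : (List (String × String)) × (List (String × String)) × (List (String × String))) : Decidable (Spec_judgment_bipartite_graphs e_0p e_wp e_1p out) := by unfold Spec_judgment_bipartite_graphs; infer_instance

-- ===== CLAIM (what is proved, stated in full; the proofs are below) =====
def Claim_equal_judgment_bipartite_graphs : Prop := ∀ (e_0p : List (String × String)) (e_wp : List (String × String)) (e_1p : List (String × String)), Dom_judgment_bipartite_graphs e_0p e_wp e_1p → Spec_judgment_bipartite_graphs e_0p e_wp e_1p (judgment_bipartite_graphs e_0p e_wp e_1p)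

-- ===== LEMMAS AND PROOFS =====

-- the group of a key x inside a list L (proof-side abbreviation)
def pvGrp (L : List (String × String)) (x : String) : List (String × String) :=
  L.filter (fun y => y.1 == x)

theorem pv_mem_grp {L : List (String × String)} {x : String} {y : String × String} :
    y ∈ pvGrp L x ↔ y ∈ L ∧ y.1 = x := by
  simp [pvGrp]

-- the two per-node helpers are the same function
theorem pvStripB_eq_pvNodeA : pvStripB = pvNodeA := rfl


theorem pv_countB_eq (e_wp : List (String × String)) :
    e_wp.foldl (fun d p =>
      let m := (p.1, PySem.Str.slice p.2 none (some (-2)))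
      d.insert m (d.getD m 0 + 1)) PySem.Dict.empty
    = PySem.Dict.counter (e_wp.map (fun p => (p.1, PySem.Str.slice p.2 none (some (-2))))) := by
  rw [← PySem.Dict.foldl_insert_getD_add_one_eq_counter, List.foldl_map]

theorem pv_countA_eq (e_wp : List (String × String)) :
    e_wp.foldl (fun d edge =>
      let m := (edge.1, PySem.Str.slice edge.2 none (some (-2)))
      if d.contains m then d.insert m (d.getD m 0 + 1) else d.insert m 1) PySem.Dict.empty
    = PySem.Dict.counter (e_wp.map (fun p => (p.1, PySem.Str.slice p.2 none (some (-2))))) := by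
  rw [← pv_countB_eq]
  congr 1
  funext d p
  by_cases h : d.contains (p.1, PySem.Str.slice p.2 none (some (-2)))
  · simp [h]
  · have h0 : d.getD (p.1, PySem.Str.slice p.2 none (some (-2))) 0 = 0 :=
      PySem.Dict.getD_of_not_contains d 0 (by simpa using h)
    simp [h, h0]

theorem pv_addif (p : (String × String) → Bool) :
    ∀ (l : List (String × String)) (S : PySem.Set (String × String)), l.Nodup → (∀ x ∈ l, x ∉ S) →
    l.foldl (fun S e => if p e then PySem.Set.add S e else S) S = S ++ l.filter p := by
  intro l
  induction l with
  | nil => intro S _ _; simp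
  | cons x l ih =>
    intro S hnd hfresh
    rcases List.nodup_cons.mp hnd with ⟨hx, hnd'⟩
    by_cases hp : p x
    · have hadd : PySem.Set.add S x = S ++ [x] :=
        PySem.Set.add_of_not_mem (hfresh x (by simp))
      simp only [List.foldl_cons, hp, if_true, hadd]
      rw [ih (S ++ [x]) hnd' (by
        intro y hy; simp only [List.mem_append, List.mem_singleton]
        rintro (hyS | rfl)
        · exact hfresh y (by simp [hy]) hyS
        · exact hx hy)]
      simp [hp]
    · simp only [List.foldl_cons, hp, if_neg, Bool.false_eq_true, not_false_iff]
      rw [ih S hnd' (fun y hy => hfresh y (by simp [hy]))]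
      simp [hp]

theorem pv_partition : ∀ (l : List ((String × String) × Int)) (A B : PySem.Set (String × String)),
    (l.map (·.1)).Nodup → (∀ p ∈ l, p.1 ∉ A) → (∀ p ∈ l, p.1 ∉ B) →
    l.foldl (fun (q : PySem.Set (String × String) × PySem.Set (String × String)) ec =>
        if ec.2 > 1 then (PySem.Set.add q.1 ec.1, q.2) else (q.1, PySem.Set.add q.2 ec.1)) (A, B)
    = (A ++ (l.filter (fun p => 1 < p.2)).map (·.1),
       B ++ (l.filter (fun p => !decide (1 < p.2))).map (·.1)) := by
  intro l
  induction l with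
  | nil => intro A B _ _ _; simp
  | cons q l ih =>
    intro A B hnd hA hB
    rw [List.map_cons] at hnd
    rcases List.nodup_cons.mp hnd with ⟨hq, hnd'⟩
    by_cases h : (1:Int) < q.2
    · have hadd : PySem.Set.add A q.1 = A ++ [q.1] :=
        PySem.Set.add_of_not_mem (hA q (by simp))
      simp only [List.foldl_cons, gt_iff_lt, if_pos h, hadd]
      rw [ih (A ++ [q.1]) B hnd'
        (by intro r hr
            simp only [List.mem_append, List.mem_singleton]
            rintro (hrA | hrq)
            · exact hA r (by simp [hr]) hrA
            · exact hq (hrq ▸ (List.mem_map.mpr ⟨r, hr, rfl⟩)))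
        (fun r hr => hB r (by simp [hr]))]
      simp [h]
    · have hadd : PySem.Set.add B q.1 = B ++ [q.1] :=
        PySem.Set.add_of_not_mem (hB q (by simp))
      simp only [List.foldl_cons, gt_iff_lt, if_neg h, hadd]
      rw [ih A (B ++ [q.1]) hnd'
        (fun r hr => hA r (by simp [hr]))
        (by intro r hr
            simp only [List.mem_append, List.mem_singleton]
            rintro (hrB | hrq)
            · exact hB r (by simp [hr]) hrB
            · exact hq (hrq ▸ (List.mem_map.mpr ⟨r, hr, rfl⟩)))]
      simp [h]



theorem pv_mem_flat (L : List (String × String)) (y : String × String) :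
    y ∈ ((PySem.Set.ofList (L.map (·.1))).filter
          (fun x => decide (1 < (pvGrp L x).length))).flatMap (pvGrp L)
    ↔ y ∈ L ∧ 1 < (pvGrp L y.1).length := by
  simp only [List.mem_flatMap, List.mem_filter, PySem.Set.mem_ofList, List.mem_map,
    decide_eq_true_eq]
  constructor
  · rintro ⟨x, ⟨⟨m, hm, rfl⟩, hlen⟩, hy⟩
    rcases pv_mem_grp.mp hy with ⟨hyL, hyx⟩
    exact ⟨hyL, by rwa [hyx]⟩
  · rintro ⟨hyL, hlen⟩
    exact ⟨y.1, ⟨⟨y, hyL, rfl⟩, hlen⟩, pv_mem_grp.mpr ⟨hyL, rfl⟩⟩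

theorem pv_nodup_flat (L : List (String × String)) (hnd : L.Nodup) :
    (((PySem.Set.ofList (L.map (·.1))).filter
          (fun x => decide (1 < (pvGrp L x).length))).flatMap (pvGrp L)).Nodup := by
  refine List.nodup_flatMap.mpr ⟨fun x _ => hnd.filter _, ?_⟩
  have h := ((PySem.Set.nodup_ofList (L.map (·.1))).filter
    (fun x => decide (1 < (pvGrp L x).length)))
  refine h.imp ?_
  intro a b hab y hya hyb
  exact hab ((pv_mem_grp.mp hya).2 ▸ (pv_mem_grp.mp hyb).2)

theorem pv_groups_getD (Dp : List (String × String)) (x : String) :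
    (Dp.foldl (fun d m => d.insert m.1 (d.getD m.1 [] ++ [m])) PySem.Dict.empty).getD x []
    = pvGrp Dp x := by
  have h1 : Dp.foldl (fun d m => d.insert m.1 (d.getD m.1 [] ++ [m]))
        (PySem.Dict.empty : PySem.Dict String (List (String × String)))
      = (Dp.map (fun m => (m.1, m))).foldl
          (fun d p => d.modify p.1 [] (· ++ [p.2])) PySem.Dict.empty := by
    rw [List.foldl_map]; rfl
  rw [h1, PySem.Dict.getD_foldl_modify_append]
  simp [pvGrp, List.filter_map, Function.comp_def]

theorem pv_groups_values (Dp : List (String × String)) :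
    (Dp.foldl (fun d m => d.insert m.1 (d.getD m.1 [] ++ [m])) PySem.Dict.empty).values
    = (PySem.Set.ofList (Dp.map (·.1))).map (pvGrp Dp) := by
  have hmod : Dp.foldl (fun d m => d.insert m.1 (d.getD m.1 [] ++ [m]))
        (PySem.Dict.empty : PySem.Dict String (List (String × String)))
      = Dp.foldl (fun d m => d.modify m.1 [] (· ++ [m])) PySem.Dict.empty := rfl
  have hkeys : (Dp.foldl (fun d m => d.insert m.1 (d.getD m.1 [] ++ [m]))
        (PySem.Dict.empty : PySem.Dict String (List (String × String)))).keys
      = PySem.Set.ofList (Dp.map (·.1)) := by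
    rw [hmod, PySem.Dict.keys_foldl_modify_key Dp (·.1) [] (fun _ m => (· ++ [m]))]
    simp [PySem.Set.update_nil_left]
  have hnd : (Dp.foldl (fun d m => d.insert m.1 (d.getD m.1 [] ++ [m]))
        (PySem.Dict.empty : PySem.Dict String (List (String × String)))).keys.Nodup := by
    rw [hkeys]; exact PySem.Set.nodup_ofList _
  have hitems := PySem.Dict.items_eq_map_keys _ hnd ([] : List (String × String))
  show (PySem.Dict.items _).map (·.2) = _
  rw [hitems, hkeys, List.map_map]
  apply List.map_congr_left
  intro x _
  exact pv_groups_getD Dp x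




theorem pv_unionfold (L : List (String × String)) (hnd : L.Nodup) :
    ∀ (Q P : List (String × String)), L = P ++ Q →
    Q.foldl (fun S edge =>
        let same_x_edges := PySem.Set.ofList (L.filter (fun e => e.1 == edge.1))
        if PySem.Set.len same_x_edges > 1 then PySem.Set.union S same_x_edges else S)
      (((PySem.Set.ofList (P.map (·.1))).filter
          (fun x => decide (1 < (pvGrp L x).length))).flatMap (pvGrp L))
    = ((PySem.Set.ofList (L.map (·.1))).filter
          (fun x => decide (1 < (pvGrp L x).length))).flatMap (pvGrp L) := by
  intro Q
  induction Q with
  | nil => intro P hP; simp at hP; subst hP; rfl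
  | cons e Q' ih =>
    intro P hP
    rw [List.foldl_cons]
    have hstep : (let same_x_edges := PySem.Set.ofList (L.filter (fun x => x.1 == e.1))
        if PySem.Set.len same_x_edges > 1 then
          PySem.Set.union (((PySem.Set.ofList (P.map (·.1))).filter
            (fun x => decide (1 < (pvGrp L x).length))).flatMap (pvGrp L)) same_x_edges
        else (((PySem.Set.ofList (P.map (·.1))).filter
            (fun x => decide (1 < (pvGrp L x).length))).flatMap (pvGrp L)))
        = (((PySem.Set.ofList ((P ++ [e]).map (·.1))).filter
            (fun x => decide (1 < (pvGrp L x).length))).flatMap (pvGrp L)) := by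
      have hgrpnd : (L.filter (fun y => y.1 == e.1)).Nodup := hnd.filter _
      have grpe : PySem.Set.ofList (L.filter (fun x => x.1 == e.1)) = pvGrp L e.1 := by
        rw [PySem.Set.ofList_eq_self_of_nodup _ hgrpnd]; rfl
      have hadd : PySem.Set.ofList ((P ++ [e]).map (·.1))
          = PySem.Set.add (PySem.Set.ofList (P.map (·.1))) e.1 := by
        rw [List.map_append]
        simp only [List.map_cons, List.map_nil]
        rw [PySem.Set.ofList_append_singleton]
      have hlen : PySem.Set.len (pvGrp L e.1) = ((pvGrp L e.1).length : Int) := rfl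
      set s := PySem.Set.ofList (P.map (·.1)) with hs
      set acc := ((s.filter (fun x => decide (1 < (pvGrp L x).length))).flatMap (pvGrp L)) with hacc
      simp only [grpe, hadd]
      by_cases hm : 1 < (pvGrp L e.1).length
      · -- multi group
        have hguard : PySem.Set.len (pvGrp L e.1) > 1 := by
          rw [hlen]; exact_mod_cast hm
        rw [if_pos hguard]
        by_cases he : e.1 ∈ s
        · rw [PySem.Set.add_of_mem he]
          show PySem.Set.update acc (pvGrp L e.1) = acc
          rw [PySem.Set.update_eq_append_filter,
            PySem.Set.ofList_eq_self_of_nodup _ (by simpa [pvGrp] using hgrpnd)]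
          have : (pvGrp L e.1).filter (fun y => !(PySem.Set.contains acc y)) = [] := by
            rw [List.filter_eq_nil_iff]
            intro y hy
            have hmem : y ∈ acc := by
              rw [hacc]
              exact List.mem_flatMap.mpr ⟨e.1,
                List.mem_filter.mpr ⟨he, by simpa using hm⟩, hy⟩
            have hc := (PySem.Set.contains_iff acc y).mpr hmem
            rw [hc]; simp
          rw [this, List.append_nil]
        · rw [PySem.Set.add_of_not_mem he]
          show PySem.Set.update acc (pvGrp L e.1)
            = ((s ++ [e.1]).filter (fun x => decide (1 < (pvGrp L x).length))).flatMap (pvGrp L)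
          rw [List.filter_append, List.flatMap_append]
          have h1 : ([e.1].filter (fun x => decide (1 < (pvGrp L x).length))) = [e.1] := by
            simp [hm]
          rw [h1]
          rw [PySem.Set.update_eq_append_filter,
            PySem.Set.ofList_eq_self_of_nodup _ (by simpa [pvGrp] using hgrpnd)]
          have h2 : (pvGrp L e.1).filter (fun y => !(PySem.Set.contains acc y)) = pvGrp L e.1 := by
            rw [List.filter_eq_self]
            intro y hy
            have hnmem : y ∉ acc := by
              rw [hacc]
              intro hc
              rcases List.mem_flatMap.mp hc with ⟨x, hx, hyx⟩
              have hxs : x ∈ s := (List.mem_filter.mp hx).1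
              have h1 : y.1 = x := (pv_mem_grp.mp hyx).2
              have h2 : y.1 = e.1 := (pv_mem_grp.mp hy).2
              exact he (by rw [h2.symm.trans h1]; exact hxs)
            simp [hnmem]
          rw [h2]
          simp only [List.append_cancel_right_eq, List.flatMap_cons, List.flatMap_nil,
            List.append_nil]
          rfl
      · -- small group: nothing happens
        have hguard : ¬ (PySem.Set.len (pvGrp L e.1) > 1) := by
          rw [hlen]; exact_mod_cast hm
        rw [if_neg hguard, PySem.Set.add_eq_ite]
        by_cases he : e.1 ∈ s
        · rw [if_pos he]
        · rw [if_neg he, List.filter_append, List.flatMap_append]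
          have h1 : ([e.1].filter (fun x => decide (1 < (pvGrp L x).length))) = [] := by
            simp [hm]
          rw [h1]
          simp only [List.flatMap_nil, List.append_nil]
          exact hacc
    rw [hstep]
    exact ih (P ++ [e]) (by rw [hP, List.append_assoc]; rfl)


theorem judgment_bipartite_graphs_eq (e_0p e_wp e_1p : List (String × String)) :
    judgment_bipartite_graphs e_0p e_wp e_1p = judgment_bipartite_graphs_alt e_0p e_wp e_1p := by
  unfold judgment_bipartite_graphs judgment_bipartite_graphs_alt
  simp only [pv_countA_eq, pv_countB_eq]
  set xs := e_wp.map (fun p => (p.1, PySem.Str.slice p.2 none (some (-2)))) with hxs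
  have hK1 : ((PySem.Dict.counter xs).items.map (·.1)).Nodup := by
    have h : (PySem.Dict.counter xs).items.map (·.1) = PySem.Set.ofList xs := by
      rw [PySem.Dict.items_counter]; simp [List.map_map, Function.comp_def]
    rw [h]; exact PySem.Set.nodup_ofList xs
  have hKge : ∀ p ∈ (PySem.Dict.counter xs).items, 1 ≤ p.2 := by
    intro p hp
    rw [PySem.Dict.items_counter] at hp
    rcases List.mem_map.mp hp with ⟨k, hk, rfl⟩
    have hkxs : k ∈ xs := (PySem.Set.mem_ofList _ _).mp hk
    have h0 : 0 < xs.count k := List.count_pos_iff.mpr hkxs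
    show (1:Int) ≤ ((xs.count k : Nat) : Int)
    exact_mod_cast h0
  -- B's `c == 1` filter is the complement of `1 < c` on counter items
  have huniq : List.filter (fun mc => mc.2 == 1) (PySem.Dict.counter xs).items
      = List.filter (fun p => !decide (1 < p.2)) (PySem.Dict.counter xs).items := by
    apply List.filter_congr
    intro p hp
    have h1 := hKge p hp
    by_cases h : p.2 = 1
    · simp [h]
    · have h2 : 1 < p.2 := lt_of_le_of_ne h1 (Ne.symm h)
      simp [h, h2]
  rw [huniq]
  rw [pv_partition ((PySem.Dict.counter xs).items) PySem.Set.empty PySem.Set.empty hK1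
      (by intro p _ hc; exact (List.not_mem_nil hc))
      (by intro p _ hc; exact (List.not_mem_nil hc))]
  simp only [PySem.Set.empty, List.nil_append]
  set Dp := ((PySem.Dict.counter xs).items.filter (fun p => decide (1 < p.2))).map (·.1) with hDp
  set U := ((PySem.Dict.counter xs).items.filter (fun p => !decide (1 < p.2))).map (·.1) with hU
  have hndDp : Dp.Nodup := by
    rw [hDp]; exact ((List.filter_sublist).map _).nodup hK1
  have hndU : U.Nodup := by
    rw [hU]; exact ((List.filter_sublist).map _).nodup hK1
  have hUDp : ∀ m, m ∈ U → m ∉ Dp := by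
    intro m hmU hmDp
    rw [hU] at hmU; rw [hDp] at hmDp
    rcases List.mem_map.mp hmU with ⟨p, hp, hpm⟩
    rcases List.mem_map.mp hmDp with ⟨q, hq, hqm⟩
    have hpK := (List.mem_filter.mp hp).1
    have hqK := (List.mem_filter.mp hq).1
    have heq : q = p := List.inj_on_of_nodup_map hK1 hqK hpK (hqm.trans hpm.symm)
    subst heq
    have h1 := (List.mem_filter.mp hp).2
    have h2 := (List.mem_filter.mp hq).2
    simp at h1 h2
    omega
  -- A's quadratic loop
  have hEn0 : List.foldl (fun S edge =>
      if (PySem.Set.ofList (List.filter (fun e => e.1 == edge.1) Dp)).len > 1 then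
        PySem.Set.union S (PySem.Set.ofList (List.filter (fun e => e.1 == edge.1) Dp))
      else S) ([] : PySem.Set (String × String)) Dp
      = ((PySem.Set.ofList (Dp.map (·.1))).filter
          (fun x => decide (1 < (pvGrp Dp x).length))).flatMap (pvGrp Dp) := by
    have h := pv_unionfold Dp hndDp Dp [] rfl
    simpa using h
  rw [hEn0]
  set F := ((PySem.Set.ofList (Dp.map (·.1))).filter
      (fun x => decide (1 < (pvGrp Dp x).length))).flatMap (pvGrp Dp) with hF
  have hdiff : ∀ (s t : PySem.Set (String × String)),
      PySem.Set.diff s t = s.filter (fun x => !PySem.Set.contains t x) := fun _ _ => rfl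
  simp only [hdiff]
  have hmulti_char : ∀ m ∈ Dp,
      (!PySem.Set.contains F m) = !decide (1 < (pvGrp Dp m.1).length) := by
    intro m hm
    by_cases h : 1 < (pvGrp Dp m.1).length
    · have hmF : m ∈ F := by rw [hF]; exact (pv_mem_flat Dp m).mpr ⟨hm, h⟩
      rw [(PySem.Set.contains_iff F m).mpr hmF]
      simp [h]
    · have hmF : m ∉ F := by
        rw [hF]; exact fun hc => h ((pv_mem_flat Dp m).mp hc).2
      have hc : PySem.Set.contains F m = false :=
        eq_false_of_ne_true (fun h' => hmF ((PySem.Set.contains_iff F m).mp h'))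
      rw [hc]
      simp [h]
  rw [List.filter_congr hmulti_char]
  set E1' := Dp.filter (fun m => !decide (1 < (pvGrp Dp m.1).length)) with hE1'
  have hndE1' : E1'.Nodup := hndDp.filter _
  have hE1'Dp : ∀ m ∈ E1', m ∈ Dp := fun m hm => (List.mem_filter.mp hm).1
  have hE1'nm : ∀ m ∈ E1', ¬ 1 < (pvGrp Dp m.1).length := by
    intro m hm
    have := (List.mem_filter.mp hm).2
    simpa using this
  -- common_x
  have hcx : List.foldl (fun s edge => PySem.Set.add s edge.1) ([] : PySem.Set String) U
      = PySem.Set.ofList (U.map (·.1)) := by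
    rw [← PySem.Set.update_map_eq_foldl_add]
    exact PySem.Set.update_nil_left _
  simp only [hcx]
  set X := PySem.Set.ofList (U.map (·.1)) with hX
  -- second accumulate loop
  have hfreshF : ∀ m ∈ E1', m ∉ F := by
    intro m hm hc
    exact hE1'nm m hm (by rw [hF] at hc; exact ((pv_mem_flat Dp m).mp hc).2)
  rw [pv_addif (fun e => PySem.Set.contains X e.1) E1' F hndE1' hfreshF]
  set G := E1'.filter (fun e => PySem.Set.contains X e.1) with hG
  have hGDp : ∀ m ∈ G, m ∈ Dp := fun m hm => hE1'Dp m (List.mem_filter.mp hm).1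
  -- third filter: E1''
  have hE1''c : ∀ m ∈ E1',
      (!PySem.Set.contains (F ++ G) m) = !PySem.Set.contains X m.1 := by
    intro m hm
    by_cases h : PySem.Set.contains X m.1 = true
    · have hmG : m ∈ F ++ G := List.mem_append.mpr (Or.inr (List.mem_filter.mpr ⟨hm, h⟩))
      rw [h, (PySem.Set.contains_iff _ m).mpr hmG]
    · have hmn : m ∉ F ++ G := by
        intro hc
        rcases List.mem_append.mp hc with hcF | hcG
        · exact hfreshF m hm hcF
        · exact h (List.mem_filter.mp hcG).2
      rw [eq_false_of_ne_true h,
        eq_false_of_ne_true (fun h' => hmn ((PySem.Set.contains_iff _ m).mp h'))]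
  rw [List.filter_congr hE1''c]
  -- Ew - En is Ew
  have hUdisj : ∀ m ∈ U, m ∉ F ++ G := by
    intro m hm hc
    have hmDp : m ∈ Dp := by
      rcases List.mem_append.mp hc with h | h
      · rw [hF] at h; exact ((pv_mem_flat Dp m).mp h).1
      · exact hGDp m h
    exact hUDp m hm hmDp
  have hEw' : U.filter (fun x => !PySem.Set.contains (F ++ G) x) = U := by
    apply List.filter_eq_self.mpr
    intro m hm
    rw [eq_false_of_ne_true (fun h' => hUdisj m hm ((PySem.Set.contains_iff _ m).mp h'))]
    rfl
  rw [hEw']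
  -- the merged set
  have hndFG : (F ++ G).Nodup := by
    rw [List.nodup_append]
    refine ⟨by rw [hF]; exact pv_nodup_flat Dp hndDp, hndE1'.filter _, ?_⟩
    intro a haF b hbG hab
    subst hab
    have h1 : 1 < (pvGrp Dp a.1).length := by
      rw [hF] at haF; exact ((pv_mem_flat Dp a).mp haF).2
    exact hE1'nm a (List.mem_filter.mp hbG).1 h1
  have hFGDp : ∀ m ∈ F ++ G, m ∈ Dp := by
    intro m hm
    rcases List.mem_append.mp hm with h | h
    · rw [hF] at h; exact ((pv_mem_flat Dp m).mp h).1
    · exact hGDp m h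
  have hmerged : PySem.Set.union U (F ++ G) = U ++ (F ++ G) := by
    show PySem.Set.update U (F ++ G) = _
    rw [PySem.Set.update_eq_append_filter, PySem.Set.ofList_eq_self_of_nodup _ hndFG]
    congr 1
    apply List.filter_eq_self.mpr
    intro m hm
    rw [eq_false_of_ne_true
      (fun h' => hUDp m ((PySem.Set.contains_iff _ m).mp h') (hFGDp m hm))]
    rfl
  rw [hmerged]
  -- B's grouping dict
  simp only [pv_groups_getD, pv_groups_values]
  -- B's moved1 is F
  have hmoved1 : (((PySem.Set.ofList (Dp.map (·.1))).map (pvGrp Dp)).filter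
        (fun g => decide (1 < g.length))).flatMap id = F := by
    rw [hF, List.filter_map]
    simp [← List.flatMap_def, Function.comp_def]
  rw [hmoved1]
  -- B's keep and moved2 predicates vs A's
  have hlen1 : ∀ m ∈ Dp, 1 ≤ (pvGrp Dp m.1).length := by
    intro m hm
    exact List.length_pos_of_mem (pv_mem_grp.mpr ⟨hm, rfl⟩)
  have hkeepc : ∀ m ∈ Dp,
      (((pvGrp Dp m.1).length == 1) && !(PySem.Set.contains X m.1))
      = ((!decide (1 < (pvGrp Dp m.1).length)) && !(PySem.Set.contains X m.1)) := by
    intro m hm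
    have h1 := hlen1 m hm
    by_cases h : (pvGrp Dp m.1).length = 1
    · simp [h]
    · have h2 : 1 < (pvGrp Dp m.1).length := by omega
      simp [h, h2]
  have hmovedc : ∀ m ∈ Dp,
      (((pvGrp Dp m.1).length == 1) && PySem.Set.contains X m.1)
      = ((!decide (1 < (pvGrp Dp m.1).length)) && PySem.Set.contains X m.1) := by
    intro m hm
    have h1 := hlen1 m hm
    by_cases h : (pvGrp Dp m.1).length = 1
    · simp [h]
    · have h2 : 1 < (pvGrp Dp m.1).length := by omega
      simp [h, h2]
  rw [List.filter_congr hkeepc, List.filter_congr hmovedc]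
  -- fold B's filters into A's double filters
  have hBkeep : Dp.filter (fun m => (!decide (1 < (pvGrp Dp m.1).length))
        && !(PySem.Set.contains X m.1))
      = E1'.filter (fun m => !PySem.Set.contains X m.1) := by
    rw [hE1', List.filter_filter]
    apply List.filter_congr
    intro m _
    exact (Bool.and_comm _ _)
  have hBmoved2 : Dp.filter (fun m => (!decide (1 < (pvGrp Dp m.1).length))
        && PySem.Set.contains X m.1)
      = G := by
    rw [hG, hE1', List.filter_filter]
    apply List.filter_congr
    intro m _
    exact (Bool.and_comm _ _)
  rw [hBkeep, hBmoved2]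
  -- e_0 / e_1 construction
  have hset : ∀ (l : List (String × String)),
      PySem.Set.ofList (l.map (fun p => (pvStripB p.1, pvStripB p.2)))
      = l.foldl (fun s edge => PySem.Set.add s (pvNodeA edge.1, pvNodeA edge.2))
          ([] : PySem.Set (String × String)) := by
    intro l
    rw [pvStripB_eq_pvNodeA, PySem.Set.ofList_eq_foldl, List.foldl_map]
  rw [hset e_0p, hset e_1p]
  -- remaining set(…) coercions on B's side
  have hndkeep : (E1'.filter (fun m => !PySem.Set.contains X m.1)).Nodup := hndE1'.filter _
  rw [PySem.Set.ofList_eq_self_of_nodup _ hndkeep]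
  have hndUFG : (U ++ (F ++ G)).Nodup := by
    rw [List.nodup_append]
    exact ⟨hndU, hndFG, fun a ha b hb hab => hUdisj a ha (hab ▸ hb)⟩
  rw [PySem.Set.ofList_eq_self_of_nodup _ hndUFG]

-- ===== VERDICT (by name: the statement is the Claim_ definition above) =====
theorem judgment_bipartite_graphs_spec : Claim_equal_judgment_bipartite_graphs := by
  intro e_0p e_wp e_1p _
  exact judgment_bipartite_graphs_eq e_0p e_wp e_1p
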